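-- pv_equiv track=rewrite | github.com/miliar/Code_Jam_Webscraper | solutions_python/solutions_year17_round0_nr1/3328.py | min_flip
-- ===== SOURCE A (Python) =====
-- def flip(s):
--     ret = ""
--     for c in s:
--         if c == '+':
--             ret += '-'
--         else:
--             ret += '+'
--     return ret
--
-- def change(s, k, i):
--     return s[: i] + flip(s[i: i + k]) + s[i + k:]
--
-- def min_flip(s, k):
--     n = len(s)
--     start = '+' * n
--     if s == start:
--         return '0'
--     queue = [(start, 0)]
--     visited = [start]
--     while len(queue) != 0:
--         curr, step = queue.pop(0)
--         for i in range(0, n - k + 1):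
--             next = change(curr, k, i)
--             if next == s:
--                 return str(step + 1)
--             if next not in visited:
--                 visited.append(next)
--                 queue.append((next, step + 1))
--
--     return "IMPOSSIBLE"
-- ===== SOURCE B (Python) =====
-- def min_flip(s, k):
--     n = len(s)
--     pending = [False] * (n + 1)
--     parity = False
--     flips = 0
--     for i, c in enumerate(s):
--         parity ^= pending[i]
--         if c == ('-' if parity else '+'):
--             continue
--         if c != ('+' if parity else '-'):
--             return "IMPOSSIBLE"
--         if i + k > n:
--             return "IMPOSSIBLE"
--         flips += 1
--         parity = not parity
--         pending[i + k] = not pending[i + k]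
--     return str(flips)
-- ===== Notes on version B (the rewrite author's own statement) =====
-- stated objective: simpler
-- what changed: Replaces the breadth-first search over all reachable +/- strings with a single left-to-right greedy pass using a difference array of pending flip ends (the flip at each position is forced, so the minimal flip set is unique). Pre_ excludes k <= 0 except when s is already all '+': for k < 0 A's BFS diverges on any other s, and for k = 0 zero-width flips are no-ops, so A's BFS answers 'IMPOSSIBLE' where B's positive-width greedy would miscount.
-- outside the precondition, e.g. on min_flip('-', 0): A returns 'IMPOSSIBLE', B returns '1'; on min_flip('--', -2): A does not finish within the time limit, B returns '2'
import Mathlib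
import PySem

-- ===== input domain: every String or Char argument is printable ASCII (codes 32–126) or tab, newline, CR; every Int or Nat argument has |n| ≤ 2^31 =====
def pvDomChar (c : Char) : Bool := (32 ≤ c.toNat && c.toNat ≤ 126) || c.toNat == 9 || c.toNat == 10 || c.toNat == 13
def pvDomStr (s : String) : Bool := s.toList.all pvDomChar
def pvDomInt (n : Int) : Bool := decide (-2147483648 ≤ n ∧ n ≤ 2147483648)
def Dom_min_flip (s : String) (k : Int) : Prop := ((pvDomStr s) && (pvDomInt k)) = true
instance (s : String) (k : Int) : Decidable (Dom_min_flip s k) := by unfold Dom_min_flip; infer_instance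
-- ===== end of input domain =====

-- B replaces A's breadth-first search over flip-reachable strings by a left-to-right greedy
-- pass with a difference array (the flip at each position is forced, so the minimal flip set
-- is unique).

-- ===== PORT A =====
-- flip(s): builds the flipped string character by character
def pvFlip (l : List Char) : List Char :=
  l.foldl (fun ret c => ret ++ [if c = '+' then '-' else '+']) []

-- change(s, k, i) = s[:i] + flip(s[i:i+k]) + s[i+k:]
def pvChange (s : List Char) (k i : Int) : List Char :=
  PySem.List.slice s none (some i) ++ pvFlip (PySem.List.slice s (some i) (some (i + k)))
    ++ PySem.List.slice s (some (i + k)) none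

-- the body of the for-loop over range(0, n-k+1); .inl = early `return str(step+1)`
def pvInner (sl : List Char) (k : Int) (curr : List Char) (step : Int) :
    List Int → List (List Char × Int) → List (List Char) →
      String ⊕ (List (List Char × Int) × List (List Char))
  | [], q, v => .inr (q, v)
  | i :: is, q, v =>
    let nxt := pvChange curr k i
    if nxt = sl then .inl (PySem.Int.toStr (step + 1))
    else if nxt ∈ v then pvInner sl k curr step is q v
    else pvInner sl k curr step is (q ++ [(nxt, step + 1)]) (v ++ [nxt])

-- the while-loop; fuel 2^n + 1 is provably sufficient for k ≥ 1 (each iteration pops one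
-- node and every string enters `visited` at most once; ≤ 2^(n-k+1) strings are reachable)
def pvBfs (sl : List Char) (k : Int) : Nat → List (List Char × Int) → List (List Char) → String
  | 0, _, _ => "IMPOSSIBLE"
  | fuel + 1, q, v =>
    match q with
    | [] => "IMPOSSIBLE"
    | (curr, step) :: rest =>
      match pvInner sl k curr step (PySem.List.pyRange 0 ((sl.length : Int) - k + 1) 1) rest v with
      | .inl r => r
      | .inr (q', v') => pvBfs sl k fuel q' v'

def min_flip (s : String) (k : Int) : String :=
  let sl := s.toList
  let n := sl.length
  let start := List.replicate n '+'
  if sl = start then "0"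
  else pvBfs sl k (2 ^ n + 1) [(start, 0)] [start]

-- ===== PORT B =====
-- the for-loop of Source B: index i, `pending` difference array, running `parity`, flip counter
def pvGreedy (cs : List Char) (k : Int) (i : Nat) (pending : List Bool) (parity : Bool)
    (flips : Int) : String :=
  if h : i < cs.length then
    let c := cs[i]
    let par2 := xor parity (PySem.List.pyGetD pending (i : Int) false)
    if c = (if par2 then '-' else '+') then
      pvGreedy cs k (i + 1) pending par2 flips
    else if c ≠ (if par2 then '+' else '-') then "IMPOSSIBLE"
    else if (i : Int) + k > (cs.length : Int) then "IMPOSSIBLE"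
    else
      pvGreedy cs k (i + 1)
        (PySem.List.pySetD pending ((i : Int) + k)
          (!(PySem.List.pyGetD pending ((i : Int) + k) false)))
        (!par2) (flips + 1)
  else PySem.Int.toStr flips
termination_by cs.length - i

def min_flip_alt (s : String) (k : Int) : String :=
  pvGreedy s.toList k 0 (List.replicate (s.toList.length + 1) false) false 0

-- ===== PRECONDITION & SPEC =====
-- Pre_ excludes k ≤ 0 except when s is already all '+': for k < 0 A's BFS diverges on any
-- other s, and for k = 0 zero-width flips are no-ops, so A's BFS answers 'IMPOSSIBLE' where
-- B's greedy (which assumes a positive window width) would miscount.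
def Pre_min_flip (s : String) (k : Int) : Prop :=
  1 ≤ k ∨ s.toList = List.replicate s.toList.length '+'
instance (s : String) (k : Int) : Decidable (Pre_min_flip s k) := by
  unfold Pre_min_flip; infer_instance

def pvWitness_min_flip : String × Int := ("-+", 1)

def Spec_min_flip (s : String) (k : Int) (out : String) : Prop := out = min_flip_alt s k
instance (s : String) (k : Int) (out : String) : Decidable (Spec_min_flip s k out) := by
  unfold Spec_min_flip; infer_instance

-- ===== CLAIM (what is proved, stated in full; the proofs are below) =====
def Claim_equal_min_flip : Prop :=
  ∀ (s : String) (k : Int), Dom_min_flip s k → Pre_min_flip s k →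
    Spec_min_flip s k (min_flip s k)

-- ===== LEMMAS AND PROOFS =====

-- parity of the number of windows of width κ, chosen from S, covering position j
def parS (κ : Nat) (S : Finset ℕ) (j : Nat) : Bool :=
  decide ((S.filter (fun i => i ≤ j ∧ j < i + κ)).card % 2 = 1)

-- the string produced from '+'*n by flipping the windows starting at the positions in S
def repOf (n κ : Nat) (S : Finset ℕ) : List Char :=
  (List.range n).map (fun j => if parS κ S j then '-' else '+')

-- toggling one window start
def pvToggle (S : Finset ℕ) (i : ℕ) : Finset ℕ := if i ∈ S then S.erase i else insert i S

theorem repOf_empty (n κ : Nat) : repOf n κ ∅ = List.replicate n '+' := by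
  simp [repOf, parS]

theorem pvFlip_eq_map (l : List Char) :
    pvFlip l = l.map (fun c => if c = '+' then '-' else '+') := by
  unfold pvFlip
  rw [PySem.List.foldl_append_singleton_eq_map]
  simp

theorem parS_toggle (κ : Nat) (S : Finset ℕ) (i j : Nat) :
    parS κ (pvToggle S i) j =
      if i ≤ j ∧ j < i + κ then !(parS κ S j) else parS κ S j := by
  classical
  unfold parS pvToggle
  by_cases hm : i ∈ S
  · have hmem : i ∈ S.filter (fun i' => i' ≤ j ∧ j < i' + κ) ↔ (i ≤ j ∧ j < i + κ) := by
      simp [Finset.mem_filter, hm]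
    by_cases hp : i ≤ j ∧ j < i + κ
    · have hcard : ((S.erase i).filter (fun i' => i' ≤ j ∧ j < i' + κ)).card =
          (S.filter (fun i' => i' ≤ j ∧ j < i' + κ)).card - 1 := by
        rw [Finset.filter_erase, Finset.card_erase_of_mem (hmem.mpr hp)]
      have hpos : 1 ≤ (S.filter (fun i' => i' ≤ j ∧ j < i' + κ)).card :=
        Finset.card_pos.mpr ⟨i, hmem.mpr hp⟩
      simp only [if_pos hm, if_pos hp, hcard, ← decide_not, decide_eq_decide]
      omega
    · have hcard : ((S.erase i).filter (fun i' => i' ≤ j ∧ j < i' + κ)).card =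
          (S.filter (fun i' => i' ≤ j ∧ j < i' + κ)).card := by
        rw [Finset.filter_erase, Finset.erase_eq_of_notMem]
        simpa [hmem] using hp
      simp [if_pos hm, if_neg hp, hcard]
  · have hnm : i ∉ S.filter (fun i' => i' ≤ j ∧ j < i' + κ) := by
      simp [Finset.mem_filter, hm]
    by_cases hp : i ≤ j ∧ j < i + κ
    · have hcard : ((insert i S).filter (fun i' => i' ≤ j ∧ j < i' + κ)).card =
          (S.filter (fun i' => i' ≤ j ∧ j < i' + κ)).card + 1 := by
        rw [Finset.filter_insert, if_pos hp, Finset.card_insert_of_notMem hnm]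
      simp only [if_neg hm, if_pos hp, hcard, ← decide_not, decide_eq_decide]
      omega
    · have hcard : ((insert i S).filter (fun i' => i' ≤ j ∧ j < i' + κ)).card =
          (S.filter (fun i' => i' ≤ j ∧ j < i' + κ)).card := by
        rw [Finset.filter_insert, if_neg hp]
      simp [if_neg hm, if_neg hp, hcard]

theorem card_toggle (S : Finset ℕ) (i : ℕ) :
    (pvToggle S i).card = if i ∈ S then S.card - 1 else S.card + 1 := by
  classical
  unfold pvToggle
  by_cases hm : i ∈ S
  · simp [hm, Finset.card_erase_of_mem hm]
  · simp [hm, Finset.card_insert_of_notMem hm]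

theorem toggle_subset {S : Finset ℕ} {m i : ℕ} (hS : S ⊆ Finset.range m) (hi : i < m) :
    pvToggle S i ⊆ Finset.range m := by
  classical
  unfold pvToggle
  split
  · exact (Finset.erase_subset _ _).trans hS
  · exact Finset.insert_subset (Finset.mem_range.mpr hi) hS

theorem range_split (n i κ : ℕ) (h : i + κ ≤ n) :
    List.range n = List.range' 0 i ++ List.range' i κ ++ List.range' (i + κ) (n - i - κ) := by
  rw [List.range_eq_range']
  have h1 : List.range' 0 i ++ List.range' (0 + 1 * i) κ = List.range' 0 (i + κ) :=
    List.range'_append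
  have h2 : List.range' 0 (i + κ) ++ List.range' (0 + 1 * (i + κ)) (n - i - κ) =
      List.range' 0 ((i + κ) + (n - i - κ)) := List.range'_append
  simp only [one_mul, zero_add] at h1 h2
  rw [h1, h2]
  congr 1
  omega

theorem change_repOf {n κ : Nat} (hκ : 1 ≤ κ) {S : Finset ℕ} {i : Nat}
    (hi : i < n + 1 - κ) :
    pvChange (repOf n κ S) (κ : Int) (i : Int) = repOf n κ (pvToggle S i) := by
  have hik : i + κ ≤ n := by omega
  unfold pvChange
  rw [PySem.List.slice_to_natCast, PySem.List.slice_natCast_add]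
  have hcast : (i : Int) + (κ : Int) = ((i + κ : Nat) : Int) := by push_cast; ring
  rw [hcast, PySem.List.slice_from_natCast, pvFlip_eq_map]
  have hrep : ∀ T : Finset ℕ, repOf n κ T =
      (List.range' 0 i).map (fun j => if parS κ T j then '-' else '+')
      ++ (List.range' i κ).map (fun j => if parS κ T j then '-' else '+')
      ++ (List.range' (i+κ) (n-i-κ)).map (fun j => if parS κ T j then '-' else '+') := by
    intro T
    rw [repOf, range_split n i κ hik, List.map_append, List.map_append]
  have hA : (repOf n κ S).take i
      = (List.range' 0 i).map (fun j => if parS κ S j then '-' else '+') := by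
    rw [hrep S, List.append_assoc]
    exact List.take_left' (by simp)
  have hBC : (repOf n κ S).drop i
      = (List.range' i κ).map (fun j => if parS κ S j then '-' else '+')
        ++ (List.range' (i+κ) (n-i-κ)).map (fun j => if parS κ S j then '-' else '+') := by
    rw [hrep S, List.append_assoc]
    exact List.drop_left' (by simp)
  have hB : ((repOf n κ S).drop i).take κ
      = (List.range' i κ).map (fun j => if parS κ S j then '-' else '+') := by
    rw [hBC]
    exact List.take_left' (by simp)
  have hC : (repOf n κ S).drop (i + κ)
      = (List.range' (i+κ) (n-i-κ)).map (fun j => if parS κ S j then '-' else '+') := by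
    rw [hrep S]
    exact List.drop_left' (by simp)
  rw [hA, hB, hC, hrep (pvToggle S i)]
  congr 1
  · congr 1
    · apply List.map_congr_left
      intro j hj
      rw [List.mem_range'_1] at hj
      have hnc : ¬(i ≤ j ∧ j < i + κ) := by omega
      rw [parS_toggle, if_neg hnc]
    · rw [List.map_map]
      apply List.map_congr_left
      intro j hj
      rw [List.mem_range'_1] at hj
      have hc : i ≤ j ∧ j < i + κ := by omega
      rw [parS_toggle, if_pos hc]
      rcases Bool.eq_false_or_eq_true (parS κ S j) with h | h <;> simp [h]
  · apply List.map_congr_left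
    intro j hj
    rw [List.mem_range'_1] at hj
    have hnc : ¬(i ≤ j ∧ j < i + κ) := by omega
    rw [parS_toggle, if_neg hnc]

theorem card_filter_cover (κ j : Nat) (hκ : 1 ≤ κ) (S : Finset ℕ) :
    (S.filter (fun i => i ≤ j ∧ j < i + κ)).card
      = ((S.filter (fun i => i < j ∧ j < i + κ)).card + (if j ∈ S then 1 else 0)) := by
  classical
  have hsplit : S.filter (fun i => i ≤ j ∧ j < i + κ)
      = (S.filter (fun i => i < j ∧ j < i + κ)) ∪ (S.filter (fun i => i = j)) := by
    ext x
    simp only [Finset.mem_filter, Finset.mem_union]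
    constructor
    · rintro ⟨hx, hle, hlt⟩
      rcases Nat.lt_or_eq_of_le hle with h' | h'
      · exact Or.inl ⟨hx, h', hlt⟩
      · exact Or.inr ⟨hx, h'⟩
    · rintro (⟨hx, hlt, hlt2⟩ | ⟨hx, rfl⟩)
      · exact ⟨hx, Nat.le_of_lt hlt, hlt2⟩
      · exact ⟨hx, le_refl _, by omega⟩
  have hdisj : Disjoint (S.filter (fun i => i < j ∧ j < i + κ)) (S.filter (fun i => i = j)) := by
    rw [Finset.disjoint_left]
    intro a ha hb
    simp only [Finset.mem_filter] at ha hb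
    omega
  have hsingle : (S.filter (fun i => i = j)).card = if j ∈ S then 1 else 0 := by
    split
    · rw [Finset.filter_eq']
      simp [*]
    · rw [Finset.filter_eq']
      simp [*]
  rw [hsplit, Finset.card_union_of_disjoint hdisj, hsingle]

theorem repOf_inj {n κ : Nat} (hκ : 1 ≤ κ) {S T : Finset ℕ}
    (hS : S ⊆ Finset.range (n + 1 - κ)) (hT : T ⊆ Finset.range (n + 1 - κ))
    (h : repOf n κ S = repOf n κ T) : S = T := by
  classical
  by_contra hne
  have hW : (symmDiff S T).Nonempty := by
    rw [Finset.symmDiff_nonempty]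
    exact hne
  set j := (symmDiff S T).min' hW with hj
  have hjmem : j ∈ symmDiff S T := Finset.min'_mem _ hW
  have hjmin : ∀ x ∈ symmDiff S T, j ≤ x := fun x hx => Finset.min'_le _ x hx
  have hjm : j < n + 1 - κ := by
    rcases Finset.mem_symmDiff.mp hjmem with ⟨hx, _⟩ | ⟨hx, _⟩
    · exact Finset.mem_range.mp (hS hx)
    · exact Finset.mem_range.mp (hT hx)
  have hjn : j < n := by omega
  have hagree : ∀ x, x < j → (x ∈ S ↔ x ∈ T) := by
    intro x hx
    constructor <;> intro hxm
    · by_contra hxT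
      exact absurd (hjmin x (Finset.mem_symmDiff.mpr (Or.inl ⟨hxm, hxT⟩))) (by omega)
    · by_contra hxS
      exact absurd (hjmin x (Finset.mem_symmDiff.mpr (Or.inr ⟨hxm, hxS⟩))) (by omega)
  have hfilter : S.filter (fun i => i < j ∧ j < i + κ) = T.filter (fun i => i < j ∧ j < i + κ) := by
    ext x
    simp only [Finset.mem_filter]
    constructor
    · rintro ⟨hx, h1, h2⟩; exact ⟨(hagree x h1).mp hx, h1, h2⟩
    · rintro ⟨hx, h1, h2⟩; exact ⟨(hagree x h1).mpr hx, h1, h2⟩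
  have hchar : parS κ S j = parS κ T j := by
    have := congrArg (fun l => l.getD j 'x') h
    simp only [repOf] at this
    rw [List.getD_eq_getElem?_getD, List.getD_eq_getElem?_getD] at this
    rw [List.getElem?_map, List.getElem?_map, List.getElem?_range hjn] at this
    simp at this
    rcases Bool.eq_false_or_eq_true (parS κ S j) with h1 | h1 <;>
      rcases Bool.eq_false_or_eq_true (parS κ T j) with h2 | h2 <;>
      simp [h1, h2] at this ⊢
  have hjdiff : (j ∈ S ∧ j ∉ T) ∨ (j ∈ T ∧ j ∉ S) := by
    rcases Finset.mem_symmDiff.mp hjmem with ⟨a, b⟩ | ⟨a, b⟩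
    · exact Or.inl ⟨a, b⟩
    · exact Or.inr ⟨a, b⟩
  unfold parS at hchar
  rw [card_filter_cover κ j hκ S, card_filter_cover κ j hκ T, hfilter] at hchar
  rw [decide_eq_decide] at hchar
  rcases hjdiff with ⟨h1, h2⟩ | ⟨h1, h2⟩ <;> simp [h1, h2] at hchar <;> omega

def parPre (κ : Nat) (S : Finset ℕ) (j : Nat) : Bool :=
  decide ((S.filter (fun i => j ≤ i + κ)).card % 2 = 1)

theorem parPre_step (κ : Nat) (S : Finset ℕ) (j : Nat) :
    xor (parPre κ S j) (decide (κ ≤ j ∧ j - κ ∈ S)) = parPre κ S (j + 1) := by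
  classical
  have hsplit : S.filter (fun i => j ≤ i + κ)
      = (S.filter (fun i => j + 1 ≤ i + κ)) ∪ (S.filter (fun i => i + κ = j)) := by
    ext x
    simp only [Finset.mem_filter, Finset.mem_union]
    constructor
    · rintro ⟨hx, h⟩
      by_cases he : x + κ = j
      · exact Or.inr ⟨hx, he⟩
      · exact Or.inl ⟨hx, by omega⟩
    · rintro (⟨hx, h⟩ | ⟨hx, h⟩)
      · exact ⟨hx, by omega⟩
      · exact ⟨hx, by omega⟩
  have hdisj : Disjoint (S.filter (fun i => j + 1 ≤ i + κ)) (S.filter (fun i => i + κ = j)) := by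
    rw [Finset.disjoint_left]
    intro a ha hb
    simp only [Finset.mem_filter] at ha hb
    omega
  have hsingle : (S.filter (fun i => i + κ = j)).card = if κ ≤ j ∧ j - κ ∈ S then 1 else 0 := by
    split
    · rename_i hcond
      have : S.filter (fun i => i + κ = j) = {j - κ} := by
        ext x
        simp only [Finset.mem_filter, Finset.mem_singleton]
        constructor
        · rintro ⟨hx, h⟩; omega
        · rintro rfl; exact ⟨hcond.2, by omega⟩
      rw [this, Finset.card_singleton]
    · rename_i hcond
      have : S.filter (fun i => i + κ = j) = ∅ := by
        ext x
        simp only [Finset.mem_filter, Finset.notMem_empty, iff_false]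
        rintro ⟨hx, h⟩
        exact hcond ⟨by omega, by rwa [show j - κ = x by omega]⟩
      rw [this, Finset.card_empty]
  unfold parPre
  rw [hsplit, Finset.card_union_of_disjoint hdisj, hsingle]
  by_cases hcond : κ ≤ j ∧ j - κ ∈ S
  · simp only [if_pos hcond, decide_eq_true hcond]
    rcases Nat.even_or_odd ((S.filter (fun i => j + 1 ≤ i + κ)).card) with h | h <;>
      · rw [show ((S.filter (fun i => j + 1 ≤ i + κ)).card + 1) % 2
              = 1 - (S.filter (fun i => j + 1 ≤ i + κ)).card % 2 by omega]
        rcases Nat.even_or_odd ((S.filter (fun i => j + 1 ≤ i + κ)).card) with h2 | h2 <;>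
          simp [Nat.even_iff, Nat.odd_iff] at h2 <;> simp [h2]
  · simp [if_neg hcond, hcond]

theorem parS_eq_parPre_succ {κ j : Nat} {S : Finset ℕ} (h : ∀ i ∈ S, i ≤ j) :
    parS κ S j = parPre κ S (j + 1) := by
  unfold parS parPre
  have heq : S.filter (fun i => i ≤ j ∧ j < i + κ) = S.filter (fun i => j + 1 ≤ i + κ) := by
    apply Finset.filter_congr
    intro x hx
    have := h x hx
    constructor
    · rintro ⟨h1, h2⟩; omega
    · intro h1; omega
  rw [heq]

theorem parS_inter (κ j : Nat) (T : Finset ℕ) :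
    parS κ T j = parS κ (T ∩ Finset.range (j + 1)) j := by
  unfold parS
  have heq : T.filter (fun i => i ≤ j ∧ j < i + κ)
      = (T ∩ Finset.range (j + 1)).filter (fun i => i ≤ j ∧ j < i + κ) := by
    ext x
    simp only [Finset.mem_filter, Finset.mem_inter, Finset.mem_range]
    constructor
    · rintro ⟨hx, h1, h2⟩; exact ⟨⟨hx, by omega⟩, h1, h2⟩
    · rintro ⟨⟨hx, _⟩, h1, h2⟩; exact ⟨hx, h1, h2⟩
  rw [heq]

theorem parPre_insert {κ j : Nat} {S : Finset ℕ} (hκ : 1 ≤ κ) (hj : j ∉ S) :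
    parPre κ (insert j S) (j + 1) = !(parPre κ S (j + 1)) := by
  classical
  unfold parPre
  rw [Finset.filter_insert, if_pos (by omega), Finset.card_insert_of_notMem (by
    simp only [Finset.mem_filter]
    rintro ⟨h, _⟩
    exact hj h)]
  rcases Nat.even_or_odd ((S.filter (fun i => j + 1 ≤ i + κ)).card) with h2 | h2 <;>
    simp [Nat.even_iff, Nat.odd_iff] at h2 <;> simp [h2, Nat.add_mod]

theorem inter_range_succ_of_mem {T : Finset ℕ} {j : Nat} (h : j ∈ T) :
    T ∩ Finset.range (j + 1) = insert j (T ∩ Finset.range j) := by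
  ext x
  simp only [Finset.mem_inter, Finset.mem_range, Finset.mem_insert]
  constructor
  · rintro ⟨hx, hr⟩
    by_cases hxj : x = j
    · exact Or.inl hxj
    · exact Or.inr ⟨hx, by omega⟩
  · rintro (rfl | ⟨hx, hr⟩)
    · exact ⟨h, by omega⟩
    · exact ⟨hx, by omega⟩

theorem inter_range_succ_of_notMem {T : Finset ℕ} {j : Nat} (h : j ∉ T) :
    T ∩ Finset.range (j + 1) = T ∩ Finset.range j := by
  ext x
  simp only [Finset.mem_inter, Finset.mem_range]
  constructor
  · rintro ⟨hx, hr⟩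
    have : x ≠ j := fun he => h (he ▸ hx)
    exact ⟨hx, by omega⟩
  · rintro ⟨hx, hr⟩
    exact ⟨hx, by omega⟩


theorem getElem_repOf {n κ : Nat} (S : Finset ℕ) {j : Nat} (hj : j < n) :
    (repOf n κ S)[j]'(by simp [repOf, hj]) = (if parS κ S j then '-' else '+') := by
  simp [repOf]

theorem repOf_entry {n κ : Nat} {T : Finset ℕ} {cs : List Char} (h : repOf n κ T = cs)
    {j : Nat} (hj : j < n) (hn : cs.length = n) :
    cs[j]'(by omega) = (if parS κ T j then '-' else '+') := by
  subst h
  exact getElem_repOf T hj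

theorem parS_of_inter_mem {κ j : Nat} {S T : Finset ℕ} (hκ : 1 ≤ κ)
    (hS : S ⊆ Finset.range j) (hTS : T ∩ Finset.range j = S) (hjT : j ∈ T) :
    parS κ T j = !(parPre κ S (j + 1)) := by
  rw [parS_inter, inter_range_succ_of_mem hjT, hTS]
  have hjS : j ∉ S := fun hmem => by
    have := Finset.mem_range.mp (hS hmem); omega
  rw [parS_eq_parPre_succ (by
    intro i hi
    rcases Finset.mem_insert.mp hi with rfl | hi'
    · omega
    · have := Finset.mem_range.mp (hS hi'); omega)]
  exact parPre_insert hκ hjS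

theorem parS_of_inter_notMem {κ j : Nat} {S T : Finset ℕ}
    (hS : S ⊆ Finset.range j) (hTS : T ∩ Finset.range j = S) (hjT : j ∉ T) :
    parS κ T j = parPre κ S (j + 1) := by
  rw [parS_inter, inter_range_succ_of_notMem hjT, hTS]
  exact parS_eq_parPre_succ (fun i hi => by have := Finset.mem_range.mp (hS hi); omega)

theorem if_char_ne (a : Bool) :
    (if a then '-' else '+') ≠ (if a then '+' else '-') := by
  rcases a <;> simp

theorem if_char_not (a : Bool) :
    (if !a then '-' else '+') = (if a then '+' else '-') := by
  rcases a <;> simp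

theorem greedy_master (cs : List Char) (κ : Nat) (hκ : 1 ≤ κ) :
    ∀ (d j : Nat) (S : Finset ℕ) (pending : List Bool) (parity : Bool) (flips : Int),
      cs.length - j = d → j ≤ cs.length →
      S ⊆ Finset.range j →
      (∀ i ∈ S, i + κ ≤ cs.length) →
      pending.length = cs.length + 1 →
      (∀ t, t ≤ cs.length → pending.getD t false = decide (κ ≤ t ∧ t - κ ∈ S)) →
      parity = parPre κ S j →
      flips = (S.card : Int) →
      (∀ j' (hj' : j' < cs.length), j' < j → cs[j']'hj' = (if parS κ S j' then '-' else '+')) →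
      ((∀ T, T ⊆ Finset.range (cs.length + 1 - κ) → T ∩ Finset.range j = S →
          repOf cs.length κ T = cs →
          pvGreedy cs (κ : Int) j pending parity flips = PySem.Int.toStr (T.card : Int)) ∧
        ((¬ ∃ T, T ⊆ Finset.range (cs.length + 1 - κ) ∧ T ∩ Finset.range j = S ∧
            repOf cs.length κ T = cs) →
          pvGreedy cs (κ : Int) j pending parity flips = "IMPOSSIBLE")) := by
  intro d
  induction d with
  | zero =>
    intro j S pending parity flips hd hjn hS hSm hplen hpend hpar hflips hpre
    have hj : j = cs.length := by omega
    subst hj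
    rw [pvGreedy, dif_neg (by omega)]
    have hexists : S ⊆ Finset.range (cs.length + 1 - κ) ∧ S ∩ Finset.range cs.length = S ∧
        repOf cs.length κ S = cs := by
      refine ⟨?_, ?_, ?_⟩
      · intro i hi
        have := hSm i hi
        exact Finset.mem_range.mpr (by omega)
      · exact Finset.inter_eq_left.mpr hS
      · apply List.ext_getElem (by simp [repOf])
        intro j' hj1 hj2
        rw [getElem_repOf S (by simpa [repOf] using hj1), hpre j' hj2 hj2]
    constructor
    · intro T hT hTS hrep
      have hTeq : T = S := by
        rw [← hTS]
        refine (Finset.inter_eq_left.mpr ?_).symm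
        intro x hx
        have := Finset.mem_range.mp (hT hx)
        exact Finset.mem_range.mpr (by omega)
      rw [hTeq, hflips]
    · intro hnone
      exact absurd ⟨S, hexists.1, hexists.2.1, hexists.2.2⟩ hnone
  | succ d ih =>
    intro j S pending parity flips hd hjn hS hSm hplen hpend hpar hflips hpre
    have hjlt : j < cs.length := by omega
    have hjS : j ∉ S := fun hmem => by have := Finset.mem_range.mp (hS hmem); omega
    have hback : ∀ T : Finset ℕ, T ∩ Finset.range j = (T ∩ Finset.range (j + 1)) ∩ Finset.range j := by
      intro T
      ext x
      simp only [Finset.mem_inter, Finset.mem_range]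
      constructor
      · rintro ⟨hx, hr⟩
        exact ⟨⟨hx, by omega⟩, hr⟩
      · rintro ⟨⟨hx, _⟩, hr⟩
        exact ⟨hx, hr⟩
    rw [pvGreedy, dif_pos hjlt]
    have hpar2 : xor parity (PySem.List.pyGetD pending (j : Int) false)
        = parPre κ S (j + 1) := by
      rw [PySem.List.pyGetD_natCast, hpend j (by omega), hpar]
      exact parPre_step κ S j
    simp only [hpar2]
    set P := parPre κ S (j + 1) with hP
    have hSle : ∀ i ∈ S, i ≤ j := fun i hi => by have := Finset.mem_range.mp (hS hi); omega
    have hparSj : parS κ S j = P := parS_eq_parPre_succ hSle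
    -- forced membership of j in any solution T when cs[j] does not match the no-flip character
    have hforced : ∀ T, T ∩ Finset.range j = S → repOf cs.length κ T = cs →
        cs[j]'hjlt ≠ (if P then '-' else '+') → j ∈ T := by
      intro T hTS hrep hne
      by_contra hjT
      have := repOf_entry hrep hjlt rfl
      rw [parS_of_inter_notMem hS hTS hjT] at this
      exact hne this
    by_cases hc1 : cs[j]'hjlt = (if P then '-' else '+')
    · -- matching character: no flip at j
      rw [if_pos hc1]
      have hnotT : ∀ T, T ∩ Finset.range j = S → repOf cs.length κ T = cs → j ∉ T := by
        intro T hTS hrep hjT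
        have := repOf_entry hrep hjlt rfl
        rw [parS_of_inter_mem hκ hS hTS hjT] at this
        rw [this, if_char_not, ← hP] at hc1
        exact if_char_ne P hc1.symm
      have ihm := ih (j + 1) S pending P flips (by omega) (by omega)
        (hS.trans (by intro x hx; simp only [Finset.mem_range] at *; omega)) hSm hplen hpend rfl hflips
        (by
          intro j' hj' hlt1
          by_cases hlt : j' < j
          · exact hpre j' hj' hlt
          · have : j' = j := by omega
            subst this
            rw [hparSj]
            exact hc1)
      constructor
      · intro T hT hTS hrep
        have hjT : j ∉ T := hnotT T hTS hrep
        refine ihm.1 T hT ?_ hrep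
        rw [inter_range_succ_of_notMem hjT, hTS]
      · intro hnone
        apply ihm.2
        rintro ⟨T, hT, hTS', hrep⟩
        apply hnone
        refine ⟨T, hT, ?_, hrep⟩
        rw [hback T, hTS']
        exact Finset.inter_eq_left.mpr hS
    · rw [if_neg hc1]
      by_cases hc2 : cs[j]'hjlt = (if P then '+' else '-')
      · rw [if_neg (by simpa using hc2)]
        by_cases hg : (j : Int) + (κ : Int) > (cs.length : Int)
        · -- needed flip does not fit: IMPOSSIBLE, and no solution T exists
          rw [if_pos hg]
          have hnoT : ¬ ∃ T, T ⊆ Finset.range (cs.length + 1 - κ) ∧ T ∩ Finset.range j = S ∧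
              repOf cs.length κ T = cs := by
            rintro ⟨T, hT, hTS, hrep⟩
            have hjT : j ∈ T := hforced T hTS hrep hc1
            have := Finset.mem_range.mp (hT hjT)
            omega
          constructor
          · intro T hT hTS hrep
            exact absurd ⟨T, hT, hTS, hrep⟩ hnoT
          · intro _
            rfl
        · -- perform the forced flip at j
          rw [if_neg hg]
          have hjκn : j + κ ≤ cs.length := by omega
          have hcast : (j : Int) + (κ : Int) = ((j + κ : Nat) : Int) := by push_cast; ring
          have hgetjk : PySem.List.pyGetD pending ((j : Int) + (κ : Int)) false = false := by
            rw [hcast, PySem.List.pyGetD_natCast, hpend (j + κ) hjκn]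
            simp [hjS]
          have hsetjk : PySem.List.pySetD pending ((j : Int) + (κ : Int))
              (!(PySem.List.pyGetD pending ((j : Int) + (κ : Int)) false))
              = pending.set (j + κ) true := by
            rw [hgetjk, hcast, PySem.List.pySetD_natCast]
            rfl
          rw [hsetjk]
          set S' := insert j S with hS'
          have hcardS' : S'.card = S.card + 1 := Finset.card_insert_of_notMem hjS
          have hparS'j : parS κ S' j = !P := by
            rw [parS_eq_parPre_succ (by
              intro i hi
              rcases Finset.mem_insert.mp hi with rfl | hi'
              · omega
              · exact hSle i hi'), hS']
            exact parPre_insert hκ hjS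
          have ihm := ih (j + 1) S' (pending.set (j + κ) true) (!P) (flips + 1)
            (by omega) (by omega)
            (by
              intro x hx
              rcases Finset.mem_insert.mp hx with rfl | hx'
              · exact Finset.mem_range.mpr (by omega)
              · have := Finset.mem_range.mp (hS hx')
                exact Finset.mem_range.mpr (by omega))
            (by
              intro i hi
              rcases Finset.mem_insert.mp hi with rfl | hi'
              · exact hjκn
              · exact hSm i hi')
            (by simpa using hplen)
            (by
              intro t ht
              by_cases hteq : t = j + κ
              · subst hteq
                rw [List.getD_eq_getElem?_getD, List.getElem?_set_self (by omega)]
                simp [hS']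
              · rw [List.getD_eq_getElem?_getD, List.getElem?_set_ne (by omega),
                    ← List.getD_eq_getElem?_getD, hpend t ht]
                have : (κ ≤ t ∧ t - κ ∈ S) ↔ (κ ≤ t ∧ t - κ ∈ S') := by
                  constructor
                  · rintro ⟨h1, h2⟩
                    exact ⟨h1, Finset.mem_insert_of_mem h2⟩
                  · rintro ⟨h1, h2⟩
                    rcases Finset.mem_insert.mp h2 with he | h2'
                    · omega
                    · exact ⟨h1, h2'⟩
                rw [decide_eq_decide.mpr this]
            )
            (by rw [hS', parPre_insert hκ hjS])
            (by rw [hcardS']; push_cast; omega)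
            (by
              intro j' hj' hlt1
              by_cases hlt : j' < j
              · rw [hpre j' hj' hlt]
                congr 1
                unfold parS
                rw [hS', Finset.filter_insert, if_neg (by omega)]
              · have : j' = j := by omega
                subst this
                rw [hparS'j, hc2, if_char_not])
          constructor
          · intro T hT hTS hrep
            have hjT : j ∈ T := hforced T hTS hrep hc1
            refine ihm.1 T hT ?_ hrep
            rw [inter_range_succ_of_mem hjT, hTS]
          · intro hnone
            apply ihm.2
            rintro ⟨T, hT, hTS', hrep⟩
            apply hnone
            refine ⟨T, hT, ?_, hrep⟩
            rw [hback T, hTS', hS']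
            ext x
            simp only [Finset.mem_inter, Finset.mem_insert, Finset.mem_range]
            constructor
            · rintro ⟨hor, hr⟩
              rcases hor with rfl | hx'
              · omega
              · exact hx'
            · intro hx
              exact ⟨Or.inr hx, Finset.mem_range.mp (hS hx)⟩
      · -- invalid character: IMPOSSIBLE, no solution exists
        rw [if_pos (by simpa using hc2)]
        have hnoT : ¬ ∃ T, T ⊆ Finset.range (cs.length + 1 - κ) ∧ T ∩ Finset.range j = S ∧
            repOf cs.length κ T = cs := by
          rintro ⟨T, hT, hTS, hrep⟩
          have hjT : j ∈ T := hforced T hTS hrep hc1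
          have := repOf_entry hrep hjlt rfl
          rw [parS_of_inter_mem hκ hS hTS hjT, if_char_not, ← hP] at this
          exact hc2 this
        constructor
        · intro T hT hTS hrep
          exact absurd ⟨T, hT, hTS, hrep⟩ hnoT
        · intro _
          rfl


theorem toggle_insert {S : Finset ℕ} {i : ℕ} (h : i ∉ S) : pvToggle S i = insert i S := by
  unfold pvToggle
  rw [if_neg h]


theorem inner_spec (sl curr : List Char) (k : Int) (st : Int) :
    ∀ (is : List Int) (q : List (List Char × Int)) (v : List (List Char)),
      ((∃ i ∈ is, pvChange curr k i = sl) ∧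
        pvInner sl k curr st is q v = .inl (PySem.Int.toStr (st + 1)))
      ∨ ((∀ i ∈ is, pvChange curr k i ≠ sl) ∧ ∃ new : List (List Char),
          pvInner sl k curr st is q v = .inr (q ++ new.map (fun x => (x, st + 1)), v ++ new) ∧
          new.Nodup ∧ (∀ x ∈ new, x ∉ v) ∧
          (∀ x ∈ new, ∃ i ∈ is, pvChange curr k i = x) ∧
          (∀ i ∈ is, pvChange curr k i ∈ v ++ new)) := by
  intro is
  induction is with
  | nil =>
    intro q v
    right
    refine ⟨by simp, [], by simp [pvInner], by simp, by simp, by simp, by simp⟩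
  | cons i is ih =>
    intro q v
    by_cases h1 : pvChange curr k i = sl
    · left
      refine ⟨⟨i, List.mem_cons_self, h1⟩, ?_⟩
      rw [pvInner]
      simp [h1]
    · by_cases h2 : pvChange curr k i ∈ v
      · rcases ih q v with ⟨⟨i', hi', hc'⟩, heq⟩ | ⟨hnone, new, heq, hnd, hnin, hfrom, hcov⟩
        · left
          refine ⟨⟨i', List.mem_cons_of_mem _ hi', hc'⟩, ?_⟩
          rw [pvInner]
          simp only [if_neg h1, if_pos h2]
          exact heq
        · right
          refine ⟨?_, new, ?_, hnd, hnin, ?_, ?_⟩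
          · intro i' hi'
            rcases List.mem_cons.mp hi' with rfl | hi''
            · exact h1
            · exact hnone i' hi''
          · rw [pvInner]
            simp only [if_neg h1, if_pos h2]
            exact heq
          · intro x hx
            rcases hfrom x hx with ⟨i', hi', hc'⟩
            exact ⟨i', List.mem_cons_of_mem _ hi', hc'⟩
          · intro i' hi'
            rcases List.mem_cons.mp hi' with rfl | hi''
            · exact List.mem_append_left _ h2
            · exact hcov i' hi''
      · rcases ih (q ++ [(pvChange curr k i, st + 1)]) (v ++ [pvChange curr k i]) with
          ⟨⟨i', hi', hc'⟩, heq⟩ | ⟨hnone, new, heq, hnd, hnin, hfrom, hcov⟩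
        · left
          refine ⟨⟨i', List.mem_cons_of_mem _ hi', hc'⟩, ?_⟩
          rw [pvInner]
          simp only [if_neg h1, if_neg h2]
          exact heq
        · right
          refine ⟨?_, pvChange curr k i :: new, ?_, ?_, ?_, ?_, ?_⟩
          · intro i' hi'
            rcases List.mem_cons.mp hi' with rfl | hi''
            · exact h1
            · exact hnone i' hi''
          · rw [pvInner]
            simp only [if_neg h1, if_neg h2]
            rw [heq]
            simp
          · refine List.Nodup.cons ?_ hnd
            intro hmem
            exact (hnin _ hmem) (List.mem_append_right _ (List.mem_singleton.mpr rfl))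
          · intro x hx
            rcases List.mem_cons.mp hx with rfl | hx'
            · exact h2
            · intro hxv
              exact (hnin x hx') (List.mem_append_left _ hxv)
          · intro x hx
            rcases List.mem_cons.mp hx with rfl | hx'
            · exact ⟨i, List.mem_cons_self, rfl⟩
            · rcases hfrom x hx' with ⟨i', hi', hc'⟩
              exact ⟨i', List.mem_cons_of_mem _ hi', hc'⟩
          · intro i' hi'
            rcases List.mem_cons.mp hi' with rfl | hi''
            · exact List.mem_append_right _ List.mem_cons_self
            · have := hcov i' hi''
              simpa [List.append_assoc] using this

theorem head_shape {curr : List Char} {st : Int} {rest : List (List Char × Int)}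
    {a b : ℕ} {e : Int}
    (h : (((curr, st) :: rest).map Prod.snd) = List.replicate a e ++ List.replicate b (e + 1)) :
    (st = e ∧ ∃ a', a = a' + 1 ∧ rest.map Prod.snd = List.replicate a' e ++ List.replicate b (e + 1))
    ∨ (st = e + 1 ∧ a = 0 ∧ ∃ b', b = b' + 1 ∧ rest.map Prod.snd = List.replicate b' (e + 1)) := by
  rw [List.map_cons] at h
  cases a with
  | zero =>
    rw [List.replicate_zero, List.nil_append] at h
    cases b with
    | zero => simp at h
    | succ b' =>
      rw [List.replicate_succ] at h
      injection h with h1 h2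
      exact Or.inr ⟨h1, rfl, b', rfl, h2⟩
  | succ a' =>
    rw [List.replicate_succ, List.cons_append] at h
    injection h with h1 h2
    exact Or.inl ⟨h1, a', rfl, h2⟩

structure BfsInv (cs : List Char) (κ : Nat) (q : List (List Char × Int))
    (v : List (List Char)) : Prop where
  vmem : ∀ x ∈ v, ∃ S, S ⊆ Finset.range (cs.length + 1 - κ) ∧ repOf cs.length κ S = x
  vnodup : v.Nodup
  startv : List.replicate cs.length '+' ∈ v
  qv : ∀ p ∈ q, p.1 ∈ v
  qrep : ∀ p ∈ q, ∃ S, S ⊆ Finset.range (cs.length + 1 - κ) ∧ repOf cs.length κ S = p.1 ∧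
    p.2 = (S.card : Int)
  qshape : ∃ (a b : ℕ) (e : Int), q.map Prod.snd
    = List.replicate a e ++ List.replicate b (e + 1)
  qcomp : ∀ x0 st0, q.head? = some (x0, st0) → ∀ S, S ⊆ Finset.range (cs.length + 1 - κ) →
    (S.card : Int) ≤ st0 → repOf cs.length κ S ∈ v
  pclosed : ∀ x ∈ v, (∀ st, (x, st) ∉ q) → ∀ i : Nat, i < cs.length + 1 - κ →
    pvChange x (κ : Int) (i : Int) ∈ v
  tnot : cs ∉ v

theorem all_visited {cs : List Char} {κ : Nat} (hκ : 1 ≤ κ) {v : List (List Char)}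
    (inv : BfsInv cs κ [] v) :
    ∀ S, S ⊆ Finset.range (cs.length + 1 - κ) → repOf cs.length κ S ∈ v := by
  have key : ∀ c (S : Finset ℕ), S.card = c → S ⊆ Finset.range (cs.length + 1 - κ) →
      repOf cs.length κ S ∈ v := by
    intro c
    induction c using Nat.strong_induction_on with
    | _ c ihc =>
      intro S hcard hS
      rcases Nat.eq_zero_or_pos c with rfl | hpos
      · have : S = ∅ := Finset.card_eq_zero.mp hcard
        rw [this, repOf_empty]
        exact inv.startv
      · have hne : S.Nonempty := Finset.card_pos.mp (by omega)
        obtain ⟨i, hi⟩ := hne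
        have him : i < cs.length + 1 - κ := Finset.mem_range.mp (hS hi)
        have hsub : S.erase i ⊆ Finset.range (cs.length + 1 - κ) :=
          (Finset.erase_subset _ _).trans hS
        have hcard' : (S.erase i).card = c - 1 := by
          rw [Finset.card_erase_of_mem hi, hcard]
        have hvmem : repOf cs.length κ (S.erase i) ∈ v := ihc (c - 1) (by omega) _ hcard' hsub
        have hch := inv.pclosed _ hvmem (by simp) i him
        rw [change_repOf hκ him] at hch
        have htog : pvToggle (S.erase i) i = S := by
          rw [toggle_insert (Finset.notMem_erase i S), Finset.insert_erase hi]
        rwa [htog] at hch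
  intro S hS
  exact key S.card S rfl hS

theorem vlen_le {cs : List Char} {κ : Nat} {q : List (List Char × Int)}
    {v : List (List Char)} (inv : BfsInv cs κ q v) :
    v.length ≤ 2 ^ (cs.length + 1 - κ) := by
  classical
  have h1 : v.length = v.toFinset.card := (List.toFinset_card_of_nodup inv.vnodup).symm
  have h2 : v.toFinset ⊆ (Finset.range (cs.length + 1 - κ)).powerset.image
      (repOf cs.length κ) := by
    intro x hx
    rcases inv.vmem x (List.mem_toFinset.mp hx) with ⟨S, hS, hrep⟩
    exact Finset.mem_image.mpr ⟨S, Finset.mem_powerset.mpr hS, hrep⟩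
  have h3 := Finset.card_le_card h2
  have h4 := Finset.card_image_le (s := (Finset.range (cs.length + 1 - κ)).powerset)
    (f := repOf cs.length κ)
  rw [Finset.card_powerset, Finset.card_range] at h4
  omega

theorem bfs_master (cs : List Char) (κ : Nat) (hκ : 1 ≤ κ) :
    ∀ (fuel : Nat) (q : List (List Char × Int)) (v : List (List Char)),
      BfsInv cs κ q v →
      q.length + (2 ^ (cs.length + 1 - κ) - v.length) ≤ fuel →
      ((∀ T, T ⊆ Finset.range (cs.length + 1 - κ) → repOf cs.length κ T = cs →
          pvBfs cs (κ : Int) fuel q v = PySem.Int.toStr (T.card : Int)) ∧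
        ((¬ ∃ T, T ⊆ Finset.range (cs.length + 1 - κ) ∧ repOf cs.length κ T = cs) →
          pvBfs cs (κ : Int) fuel q v = "IMPOSSIBLE")) := by
  intro fuel
  induction fuel with
  | zero =>
    intro q v inv hm
    have hq : q = [] := List.eq_nil_of_length_eq_zero (by omega)
    subst hq
    constructor
    · intro T hT hrep
      exact absurd (hrep ▸ all_visited hκ inv T hT) inv.tnot
    · intro _
      rfl
  | succ fuel ih =>
    intro q v inv hm
    match q with
    | [] =>
      constructor
      · intro T hT hrep
        exact absurd (hrep ▸ all_visited hκ inv T hT) inv.tnot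
      · intro _
        rfl
    | (curr, st) :: rest =>
      obtain ⟨Sc, hScsub, hScrep0, hScst0⟩ := inv.qrep (curr, st) List.mem_cons_self
      have hScrep : repOf cs.length κ Sc = curr := hScrep0
      have hScst : st = (Sc.card : Int) := hScst0
      have hmemR : ∀ i : Int, i ∈ PySem.List.pyRange 0 ((cs.length : Int) - (κ : Int) + 1) 1 ↔
          0 ≤ i ∧ i.toNat < cs.length + 1 - κ := by
        intro i
        rw [PySem.List.mem_pyRange_one]
        omega
      rcases inner_spec cs curr (κ : Int) st
          (PySem.List.pyRange 0 ((cs.length : Int) - (κ : Int) + 1) 1) rest v with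
        ⟨⟨i, hiR, hic⟩, heq⟩ | ⟨hnomatch, new, heq, hnd, hnin, hfrom, hcov⟩
      · -- target generated: return str(step+1)
        have hi0 := (hmemR i).mp hiR
        have hicast : ((i.toNat : Nat) : Int) = i := by omega
        have hT0 : pvChange curr (κ : Int) i = repOf cs.length κ (pvToggle Sc i.toNat) := by
          have h' : pvChange (repOf cs.length κ Sc) (κ : Int) ((i.toNat : Nat) : Int)
              = repOf cs.length κ (pvToggle Sc i.toNat) := change_repOf hκ hi0.2
          rwa [hScrep, hicast] at h'
        set T0 := pvToggle Sc i.toNat with hT0def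
        have hT0sub : T0 ⊆ Finset.range (cs.length + 1 - κ) := toggle_subset hScsub hi0.2
        have hT0rep : repOf cs.length κ T0 = cs := by rw [← hT0, hic]
        have hT0card : (T0.card : Int) = st + 1 := by
          by_cases hmem : i.toNat ∈ Sc
          · exfalso
            have hc1 : 1 ≤ Sc.card := Finset.card_pos.mpr ⟨i.toNat, hmem⟩
            have hle : (T0.card : Int) ≤ st := by
              rw [hT0def, card_toggle, if_pos hmem]
              push_cast [hc1]
              omega
            have := inv.qcomp curr st rfl T0 hT0sub hle
            rw [hT0rep] at this
            exact inv.tnot this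
          · rw [hT0def, card_toggle, if_neg hmem]
            push_cast
            omega
        have hres : pvBfs cs (κ : Int) (fuel + 1) ((curr, st) :: rest) v
            = PySem.Int.toStr (st + 1) := by
          rw [pvBfs]
          simp only [heq]
        constructor
        · intro T hT hrep
          have : T = T0 := repOf_inj hκ hT hT0sub (by rw [hrep, hT0rep])
          rw [hres, this, hT0card]
        · intro hnone
          exact absurd ⟨T0, hT0sub, hT0rep⟩ hnone
      · -- no match in this round: continue with the extended queue
        have hst0 : 0 ≤ st := by rw [hScst]; exact Int.natCast_nonneg _
        have hchg : ∀ i : Int, i ∈ PySem.List.pyRange 0 ((cs.length : Int) - (κ : Int) + 1) 1 →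
            pvChange curr (κ : Int) i = repOf cs.length κ (pvToggle Sc i.toNat) := by
          intro i hiR
          have hi0 := (hmemR i).mp hiR
          have hicast : ((i.toNat : Nat) : Int) = i := by omega
          have h' : pvChange (repOf cs.length κ Sc) (κ : Int) ((i.toNat : Nat) : Int)
              = repOf cs.length κ (pvToggle Sc i.toNat) := change_repOf hκ hi0.2
          rwa [hScrep, hicast] at h'
        have hnewfact : ∀ x ∈ new, ∃ S', S' ⊆ Finset.range (cs.length + 1 - κ) ∧
            repOf cs.length κ S' = x ∧ ((S'.card : Int) = st + 1) := by
          intro x hx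
          rcases hfrom x hx with ⟨i, hiR, hchange⟩
          have hi0 := (hmemR i).mp hiR
          refine ⟨pvToggle Sc i.toNat, toggle_subset hScsub hi0.2, ?_, ?_⟩
          · rw [← hchg i hiR, hchange]
          · by_cases hmem : i.toNat ∈ Sc
            · exfalso
              have hc1 : 1 ≤ Sc.card := Finset.card_pos.mpr ⟨i.toNat, hmem⟩
              have hle : ((pvToggle Sc i.toNat).card : Int) ≤ st := by
                rw [card_toggle, if_pos hmem]
                push_cast [hc1]
                omega
              have hvv := inv.qcomp curr st rfl _ (toggle_subset hScsub hi0.2) hle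
              rw [← hchg i hiR, hchange] at hvv
              exact (hnin x hx) hvv
            · rw [card_toggle, if_neg hmem]
              push_cast
              omega
        have hqrep' : ∀ p ∈ rest ++ new.map (fun x => (x, st + 1)),
            ∃ S, S ⊆ Finset.range (cs.length + 1 - κ) ∧ repOf cs.length κ S = p.1 ∧
              p.2 = (S.card : Int) := by
          intro p hp
          rcases List.mem_append.mp hp with hp' | hp'
          · exact inv.qrep p (List.mem_cons_of_mem _ hp')
          · rcases List.mem_map.mp hp' with ⟨x, hx, rfl⟩
            rcases hnewfact x hx with ⟨S', h1, h2, h3⟩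
            exact ⟨S', h1, h2, h3.symm⟩
        have hpc : ∀ x ∈ v ++ new, (∀ st', (x, st') ∉ rest ++ new.map (fun x => (x, st + 1))) →
            ∀ i : Nat, i < cs.length + 1 - κ →
              pvChange x (κ : Int) (i : Int) ∈ v ++ new := by
          intro x hx hnq i him
          rcases List.mem_append.mp hx with hxv | hxnew
          · by_cases hxc : x = curr
            · subst hxc
              exact hcov ((i : Nat) : Int) ((hmemR _).mpr ⟨by omega, by simpa using him⟩)
            · by_cases hq : ∀ st', (x, st') ∉ (curr, st) :: rest
              · exact List.mem_append_left _ (inv.pclosed x hxv hq i him)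
              · push_neg at hq
                obtain ⟨st', hst'⟩ := hq
                rcases List.mem_cons.mp hst' with heqq | hrest'
                · exact absurd (congrArg Prod.fst heqq) hxc
                · exact absurd (List.mem_append_left _ hrest') (hnq st')
          · exact absurd (List.mem_append_right _ (List.mem_map.mpr ⟨x, hxnew, rfl⟩))
              (hnq (st + 1))
        obtain ⟨a, b, e, hsh⟩ := inv.qshape
        have hnewsnd : ∀ l : List (List Char), (l.map (fun x => (x, st + 1))).map Prod.snd
            = List.replicate l.length (st + 1) := by
          intro l
          induction l with
          | nil => rfl
          | cons y ys ihl => simp only [List.map_cons, List.length_cons,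
              List.replicate_succ, ihl]
        have hall : (∀ p ∈ rest ++ new.map (fun x => (x, st + 1)), p.2 = st + 1) ∨
            (∃ x1 st1, (rest ++ new.map (fun x => (x, st + 1))).head? = some (x1, st1) ∧
              st1 = st) := by
          rcases head_shape hsh with ⟨hst, a', ha, hrest⟩ | ⟨hst, ha, b', hb, hrest⟩
          · cases a' with
            | zero =>
              left
              intro p hp
              rcases List.mem_append.mp hp with hp' | hp'
              · have : p.2 ∈ rest.map Prod.snd := List.mem_map_of_mem hp'
                rw [hrest] at this
                simp only [List.replicate_zero, List.nil_append] at this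
                rw [hst]
                exact List.eq_of_mem_replicate this
              · rcases List.mem_map.mp hp' with ⟨x, hx, rfl⟩
                rfl
            | succ a'' =>
              cases rest with
              | nil =>
                left
                intro p hp
                rcases List.mem_append.mp hp with hp' | hp'
                · exact absurd hp' (List.not_mem_nil)
                · rcases List.mem_map.mp hp' with ⟨x, hx, rfl⟩
                  rfl
              | cons r rrest =>
                right
                rw [List.map_cons, List.replicate_succ, List.cons_append] at hrest
                injection hrest with h1 h2
                exact ⟨r.1, r.2, by simp, by rw [h1, hst]⟩
          · cases rest with
            | nil =>
              left
              intro p hp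
              rcases List.mem_append.mp hp with hp' | hp'
              · exact absurd hp' (List.not_mem_nil)
              · rcases List.mem_map.mp hp' with ⟨x, hx, rfl⟩
                rfl
            | cons r rrest =>
              right
              cases b' with
              | zero => simp at hrest
              | succ b'' =>
                rw [List.map_cons, List.replicate_succ] at hrest
                injection hrest with h1 h2
                exact ⟨r.1, r.2, by simp, by rw [h1, hst]⟩
        have hqc : ∀ x0 st0, (rest ++ new.map (fun x => (x, st + 1))).head? = some (x0, st0) →
            ∀ S, S ⊆ Finset.range (cs.length + 1 - κ) → (S.card : Int) ≤ st0 →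
              repOf cs.length κ S ∈ v ++ new := by
          intro x0 st0 hhead S hS hcard
          have hx0q' : (x0, st0) ∈ rest ++ new.map (fun x => (x, st + 1)) :=
            List.mem_of_mem_head? hhead
          have hst0' : st0 = st ∨ st0 = st + 1 := by
            rcases List.mem_append.mp hx0q' with hp' | hp'
            · have hmm : st0 ∈ rest.map Prod.snd := List.mem_map_of_mem hp'
              rcases head_shape hsh with ⟨hst, a', ha, hrest⟩ | ⟨hst, ha, b', hb, hrest⟩
              · rw [hrest] at hmm
                rcases List.mem_append.mp hmm with h' | h'
                · left
                  rw [List.eq_of_mem_replicate h', hst]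
                · right
                  rw [List.eq_of_mem_replicate h', hst]
              · rw [hrest] at hmm
                left
                rw [List.eq_of_mem_replicate hmm, hst]
            · rcases List.mem_map.mp hp' with ⟨x, hx, hxe⟩
              right
              exact (congrArg Prod.snd hxe).symm
          by_cases hle : (S.card : Int) ≤ st
          · exact List.mem_append_left _ (inv.qcomp curr st rfl S hS hle)
          · have hcard' : (S.card : Int) = st + 1 := by
              rcases hst0' with h' | h' <;> omega
            have hSpos : 0 < S.card := by omega
            obtain ⟨i, hi⟩ := Finset.card_pos.mp hSpos
            have him : i < cs.length + 1 - κ := Finset.mem_range.mp (hS hi)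
            have hS''sub : S.erase i ⊆ Finset.range (cs.length + 1 - κ) :=
              (Finset.erase_subset _ _).trans hS
            have hS''card : ((S.erase i).card : Int) = st := by
              rw [Finset.card_erase_of_mem hi]
              push_cast [hSpos]
              omega
            have hS''v : repOf cs.length κ (S.erase i) ∈ v :=
              inv.qcomp curr st rfl _ hS''sub (by omega)
            have hallL : ∀ p ∈ rest ++ new.map (fun x => (x, st + 1)), p.2 = st + 1 := by
              rcases hall with h' | ⟨x1, st1, hh1, hst1⟩
              · exact h'
              · rw [hhead] at hh1
                injection hh1 with hh2
                have : st0 = st1 := congrArg Prod.snd hh2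
                omega
            have hS''notq : ∀ st', (repOf cs.length κ (S.erase i), st')
                ∉ rest ++ new.map (fun x => (x, st + 1)) := by
              intro st' hmem'
              obtain ⟨S₂, hS₂sub, hS₂rep, hS₂st⟩ := hqrep' _ hmem'
              have hS₂eq : S₂ = S.erase i := repOf_inj hκ hS₂sub hS''sub hS₂rep
              have h1 : st' = st + 1 := hallL _ hmem'
              have h2 : st' = (S₂.card : Int) := hS₂st
              rw [hS₂eq, hS''card] at h2
              omega
            have hchm := hpc _ (List.mem_append_left _ hS''v) hS''notq i him
            rw [change_repOf hκ him] at hchm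
            have htog : pvToggle (S.erase i) i = S := by
              rw [toggle_insert (Finset.notMem_erase i S), Finset.insert_erase hi]
            rwa [htog] at hchm
        have inv' : BfsInv cs κ (rest ++ new.map (fun x => (x, st + 1))) (v ++ new) := by
          refine ⟨?_, ?_, ?_, ?_, hqrep', ?_, hqc, hpc, ?_⟩
          · intro x hx
            rcases List.mem_append.mp hx with hxv | hxnew
            · exact inv.vmem x hxv
            · rcases hnewfact x hxnew with ⟨S', h1, h2, _⟩
              exact ⟨S', h1, h2⟩
          · exact List.Nodup.append inv.vnodup hnd (List.disjoint_right.mpr hnin)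
          · exact List.mem_append_left _ inv.startv
          · intro p hp
            rcases List.mem_append.mp hp with hp' | hp'
            · exact List.mem_append_left _ (inv.qv p (List.mem_cons_of_mem _ hp'))
            · rcases List.mem_map.mp hp' with ⟨x, hx, rfl⟩
              exact List.mem_append_right _ hx
          · rcases head_shape hsh with ⟨hst, a', ha, hrest⟩ | ⟨hst, ha, b', hb, hrest⟩
            · refine ⟨a', b + new.length, e, ?_⟩
              rw [List.map_append, hrest, hnewsnd new, List.append_assoc, hst,
                ← List.replicate_add]
            · refine ⟨b', new.length, e + 1, ?_⟩
              rw [List.map_append, hrest, hnewsnd new, hst]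
          · intro hmem
            rcases List.mem_append.mp hmem with h' | h'
            · exact inv.tnot h'
            · rcases hfrom cs h' with ⟨i, hiR, hchange⟩
              exact (hnomatch i hiR) hchange
        have hvlen' := vlen_le inv'
        have hmeas : (rest ++ new.map (fun x => (x, st + 1))).length +
            (2 ^ (cs.length + 1 - κ) - (v ++ new).length) ≤ fuel := by
          simp only [List.length_append, List.length_map] at *
          simp only [List.length_cons] at hm
          omega
        have ihm := ih _ _ inv' hmeas
        have hrw : pvBfs cs (κ : Int) (fuel + 1) ((curr, st) :: rest) v
            = pvBfs cs (κ : Int) fuel (rest ++ new.map (fun x => (x, st + 1))) (v ++ new) := by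
          rw [pvBfs]
          simp only [heq]
        exact ⟨fun T hT hrep => by rw [hrw]; exact ihm.1 T hT hrep,
          fun h => by rw [hrw]; exact ihm.2 h⟩

theorem greedy_allplus (cs : List Char) (hcs : cs = List.replicate cs.length '+') (k : Int) :
    ∀ (d j : Nat) (pending : List Bool) (flips : Int), cs.length - j = d →
      (∀ t, pending.getD t false = false) →
      pvGreedy cs k j pending false flips = PySem.Int.toStr flips := by
  intro d
  induction d with
  | zero =>
    intro j pending flips hd hpend
    rw [pvGreedy, dif_neg (by omega)]
  | succ d ih =>
    intro j pending flips hd hpend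
    have hjlt : j < cs.length := by omega
    rw [pvGreedy, dif_pos hjlt]
    have hcj : cs[j]'hjlt = '+' := by
      have h0 : cs[j]? = (List.replicate cs.length '+')[j]? := by rw [← hcs]
      rw [List.getElem?_replicate, if_pos hjlt, List.getElem?_eq_getElem hjlt] at h0
      injection h0
    have hpar2 : xor false (PySem.List.pyGetD pending (j : Int) false) = false := by
      rw [PySem.List.pyGetD_natCast, hpend j]
      rfl
    simp only [hpar2]
    have hcond : cs[j]'hjlt = (if (false : Bool) = true then '-' else '+') := by
      rw [hcj]
      rfl
    rw [if_pos hcond]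
    exact ih (j + 1) pending flips (by omega) hpend

-- ===== VERDICT (by name: the statement is the Claim_ definition above) =====
theorem min_flip_spec : Claim_equal_min_flip := by
  unfold Claim_equal_min_flip
  intro s k hdom hpre
  unfold Spec_min_flip
  unfold Pre_min_flip at hpre
  set cs := s.toList with hcs
  by_cases hstart : cs = List.replicate cs.length '+'
  · -- s is already all '+': both return "0" (for ANY k)
    have hB : min_flip_alt s k = PySem.Int.toStr 0 := by
      unfold min_flip_alt
      refine greedy_allplus cs hstart k cs.length 0 _ 0 (by omega) ?_
      intro t
      rcases Nat.lt_or_ge t (cs.length + 1) with h | h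
      · rw [List.getD_eq_getElem?_getD, List.getElem?_replicate, if_pos h]
        rfl
      · rw [List.getD_eq_getElem?_getD, List.getElem?_eq_none (by simpa using h)]
        rfl
    unfold min_flip
    rw [if_pos hstart, hB]
    rfl
  have hpre' : 1 ≤ k := by
    rcases hpre with h | h
    · exact h
    · exact absurd h hstart
  have hk : k = (k.toNat : Int) := (Int.toNat_of_nonneg (by omega)).symm
  set κ := k.toNat with hκdef
  have hκ1 : 1 ≤ κ := by omega
  have hgreedy := greedy_master cs κ hκ1 (cs.length - 0) 0 ∅
    (List.replicate (cs.length + 1) false) false 0 rfl (by omega)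
    (by simp) (by simp) (by simp)
    (by
      intro t ht
      have h1 : (List.replicate (cs.length + 1) false).getD t false = false := by
        rcases Nat.lt_or_ge t (cs.length + 1) with h | h
        · rw [List.getD_eq_getElem?_getD, List.getElem?_replicate, if_pos h]
          rfl
        · rw [List.getD_eq_getElem?_getD, List.getElem?_eq_none (by simpa using h)]
          rfl
      rw [h1]
      simp)
    (by simp [parPre]) (by simp)
    (by intro j' hj' h; omega)
  have hBval : min_flip_alt s k
      = pvGreedy cs (κ : Int) 0 (List.replicate (cs.length + 1) false) false 0 := by
    unfold min_flip_alt
    rw [← hk]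
  have hinv0 : BfsInv cs κ [(List.replicate cs.length '+', 0)]
      [List.replicate cs.length '+'] := by
    refine ⟨?_, ?_, ?_, ?_, ?_, ?_, ?_, ?_, ?_⟩
    · intro x hx
      rcases List.mem_singleton.mp hx with rfl
      exact ⟨∅, Finset.empty_subset _, repOf_empty _ _⟩
    · simp
    · exact List.mem_singleton.mpr rfl
    · intro p hp
      rcases List.mem_singleton.mp hp with rfl
      exact List.mem_singleton.mpr rfl
    · intro p hp
      rcases List.mem_singleton.mp hp with rfl
      exact ⟨∅, Finset.empty_subset _, repOf_empty _ _, by simp⟩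
    · exact ⟨1, 0, 0, by simp⟩
    · intro x0 st0 hhead S hS hcard
      injection hhead with hhead'
      have hst0 : st0 = 0 := (congrArg Prod.snd hhead').symm
      have hScard : S.card = 0 := by omega
      have : S = ∅ := Finset.card_eq_zero.mp hScard
      rw [this, repOf_empty]
      exact List.mem_singleton.mpr rfl
    · intro x hx hnq i him
      rcases List.mem_singleton.mp hx with rfl
      exact absurd List.mem_cons_self (hnq 0)
    · intro hmem
      exact hstart (List.mem_singleton.mp hmem)
  have hm1 : cs.length + 1 - κ ≤ cs.length := by omega
  have hple : 2 ^ (cs.length + 1 - κ) ≤ 2 ^ cs.length :=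
    Nat.pow_le_pow_right (by omega) hm1
  have hppos : 1 ≤ 2 ^ (cs.length + 1 - κ) := Nat.one_le_two_pow
  have hmeas : ([(List.replicate cs.length '+', (0 : Int))]).length
      + (2 ^ (cs.length + 1 - κ) - ([List.replicate cs.length '+']).length)
      ≤ 2 ^ cs.length + 1 := by
    simp only [List.length_singleton]
    omega
  have hbfs := bfs_master cs κ hκ1 (2 ^ cs.length + 1) _ _ hinv0 hmeas
  have hAval : min_flip s k = pvBfs cs (κ : Int) (2 ^ cs.length + 1)
      [(List.replicate cs.length '+', 0)] [List.replicate cs.length '+'] := by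
    unfold min_flip
    rw [if_neg hstart, ← hk]
  by_cases hex : ∃ T, T ⊆ Finset.range (cs.length + 1 - κ) ∧ repOf cs.length κ T = cs
  · obtain ⟨T, hT, hrep⟩ := hex
    rw [hAval, hbfs.1 T hT hrep, hBval, hgreedy.1 T hT (by simp) hrep]
  · rw [hAval, hbfs.2 hex, hBval, hgreedy.2 (by
      rintro ⟨T, h1, h2, h3⟩
      exact hex ⟨T, h1, h3⟩)]
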